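-- pv_equiv track=rewrite | github.com/bast/advent-of-code | 2015/day-05/strings.py | property1
-- ===== SOURCE A (Python) =====
-- from collections import defaultdict
--
-- def property1(s: str) -> bool:
--     positions = defaultdict(set)
--     for i, c in enumerate(s):
--         if i > 0:
--             pair = (s[i - 1], c)
--             positions[pair].add(i - 1)
--             positions[pair].add(i)
--     for _, pos in positions.items():
--         if len(pos) > 3:
--             return True
--     return False
-- ===== SOURCE B (Python) =====
-- def property1(s: str) -> bool:
--     # A letter pair repeats without overlapping iff some pair s[i:i+2]
--     # occurs again starting at or after index i+2.
--     return any(s[i:i + 2] in s[i + 2:] for i in range(len(s) - 1))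
-- ===== Notes on version B (the rewrite author's own statement) =====
-- stated objective: idiomatic
-- what changed: Replaced the defaultdict of position-sets (record every index covered by each pair, then scan for a set of size > 3) by a direct substring search: a pair repeats non-overlapping iff s[i:i+2] occurs again in s[i+2:].
import Mathlib
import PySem

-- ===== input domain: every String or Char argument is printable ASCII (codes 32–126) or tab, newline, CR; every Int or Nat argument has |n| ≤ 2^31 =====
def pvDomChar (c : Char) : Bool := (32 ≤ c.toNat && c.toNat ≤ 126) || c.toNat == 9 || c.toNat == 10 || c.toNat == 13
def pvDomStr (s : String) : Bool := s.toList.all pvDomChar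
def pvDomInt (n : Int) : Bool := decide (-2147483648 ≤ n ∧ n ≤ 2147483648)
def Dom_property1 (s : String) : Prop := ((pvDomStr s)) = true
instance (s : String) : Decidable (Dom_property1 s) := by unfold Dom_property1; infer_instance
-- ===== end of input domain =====

-- B replaces A's defaultdict of position-sets by the idiomatic substring search
-- "s[i:i+2] in s[i+2:]" (objective: idiomatic; same return value everywhere).

-- ===== PORT A =====
-- loop body of A's first for-loop (one enumerate step); s[i-1] is ported with
-- pyGetD: the branch only runs for 0 < i < len(s), where the index is in range.
def pvStepA (cs : List Char) (d : PySem.Dict (Char × Char) (PySem.Set Int))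
    (ic : Int × Char) : PySem.Dict (Char × Char) (PySem.Set Int) :=
  if ic.1 > 0 then
    let pair : Char × Char := (PySem.List.pyGetD cs (ic.1 - 1) ' ', ic.2)
    let d1 := d.modify pair [] (fun st => PySem.Set.add st (ic.1 - 1))
    d1.modify pair [] (fun st => PySem.Set.add st ic.1)
  else d

def property1 (s : String) : Bool :=
  let positions := (PySem.List.enumerate s.toList 0).foldl (pvStepA s.toList) PySem.Dict.empty
  positions.items.any (fun kv => decide (kv.2.length > 3))

-- ===== PORT B =====
def property1_alt (s : String) : Bool :=
  (PySem.List.pyRange 0 (PySem.Str.len s - 1) 1).any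
    (fun i => PySem.Str.isIn (PySem.Str.slice s (some i) (some (i + 2)))
                             (PySem.Str.slice s (some (i + 2)) none))

-- ===== PRECONDITION & SPEC =====
def Spec_property1 (s : String) (out : Bool) : Prop := out = property1_alt s
instance (s : String) (out : Bool) : Decidable (Spec_property1 s out) := by unfold Spec_property1; infer_instance

-- ===== CLAIM (what is proved, stated in full; the proofs are below) =====
def Claim_equal_property1 : Prop := ∀ (s : String), Dom_property1 s → Spec_property1 s (property1 s)

-- ===== LEMMAS AND PROOFS =====

-- Common characterisation: some letter pair occurs at two starts ≥ 2 apart.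
def pvHasRep (cs : List Char) : Prop :=
  ∃ t u : Nat, t + 2 ≤ u ∧ u + 1 < cs.length ∧ cs[t]? = cs[u]? ∧ cs[t + 1]? = cs[u + 1]?

-- the pair A reads at enumerate step i (i ≥ 1): (s[i-1], s[i]), totalised with getD
def pvPair (cs : List Char) (i : Nat) : Char × Char := (cs.getD (i - 1) ' ', cs.getD i ' ')

-- the raw insertion sequence A feeds into positions[p] during the first m steps
def pvRaw (cs : List Char) (m : Nat) (p : Char × Char) : List Int :=
  (List.range m).flatMap
    (fun i => if 0 < i ∧ pvPair cs i = p then [(i : Int) - 1, (i : Int)] else [])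

-- [a, b] is an infix exactly when two adjacent positions carry a and b
lemma pvInfixPair (a b : Char) (l : List Char) :
    [a, b] <:+: l ↔ ∃ j : Nat, l[j]? = some a ∧ l[j + 1]? = some b := by
  induction l with
  | nil => simp
  | cons c l ih =>
    rw [List.infix_cons_iff]
    constructor
    · rintro (hp | hi)
      · rw [List.cons_prefix_cons] at hp
        obtain ⟨rfl, hb⟩ := hp
        cases l with
        | nil => simp at hb
        | cons d l' =>
          rw [List.cons_prefix_cons] at hb
          exact ⟨0, by simp, by simp [hb.1.symm]⟩
      · obtain ⟨j, h1, h2⟩ := ih.mp hi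
        exact ⟨j + 1, by simpa using h1, by simpa using h2⟩
    · rintro ⟨j, h1, h2⟩
      cases j with
      | zero =>
        simp only [List.getElem?_cons_zero, Option.some.injEq] at h1
        cases l with
        | nil => simp at h2
        | cons d l' =>
          simp only [List.getElem?_cons_succ, List.getElem?_cons_zero,
            Option.some.injEq] at h2
          left
          simp [List.cons_prefix_cons, h1, h2]
      | succ j =>
        right
        exact ih.mpr ⟨j, by simpa using h1, by simpa using h2⟩

-- take 2 of a drop at an in-range position is the two characters there
lemma pvTakeTwo (cs : List Char) (k : Nat) (hk : k + 1 < cs.length) :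
    (cs.drop k).take 2 = [cs[k], cs[k + 1]] := by
  rw [List.drop_eq_getElem_cons (show k < cs.length by omega), List.drop_eq_getElem_cons hk,
    List.take_succ_cons, List.take_succ_cons, List.take_zero]

-- B returns true iff pvHasRep
lemma pvBIff (s : String) : property1_alt s = true ↔ pvHasRep s.toList := by
  unfold property1_alt pvHasRep
  rw [List.any_eq_true]
  constructor
  · rintro ⟨i, hmem, hin⟩
    rw [PySem.List.mem_pyRange_one] at hmem
    obtain ⟨h0, hlt⟩ := hmem
    lift i to Nat using h0 with k
    rw [PySem.Str.len_eq] at hlt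
    have hk : k + 1 < s.toList.length := by omega
    rw [PySem.Str.isIn_iff_infix, PySem.Str.toList_slice, PySem.Str.toList_slice,
      PySem.Chars.slice_eq_listSlice, PySem.Chars.slice_eq_listSlice] at hin
    have e1 : (k : Int) + 2 = (k : Int) + ((2 : Nat) : Int) := by push_cast; ring
    rw [e1, PySem.List.slice_natCast_add] at hin
    have e2 : (k : Int) + ((2 : Nat) : Int) = ((k + 2 : Nat) : Int) := by push_cast; ring
    rw [e2, PySem.List.slice_from_natCast] at hin
    rw [pvTakeTwo s.toList k hk, pvInfixPair] at hin
    obtain ⟨j, h1, h2⟩ := hin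
    rw [List.getElem?_drop] at h1 h2
    refine ⟨k, k + 2 + j, by omega, ?_, ?_, ?_⟩
    · obtain ⟨hb, -⟩ := List.getElem?_eq_some_iff.mp h2
      omega
    · rw [h1, List.getElem?_eq_getElem (show k < s.toList.length by omega)]
    · have e : k + 2 + j + 1 = k + 2 + (j + 1) := by omega
      rw [e, h2, List.getElem?_eq_getElem hk]
  · rintro ⟨t, u, htu, hu, h1, h2⟩
    have ht : t + 1 < s.toList.length := by omega
    refine ⟨(t : Int), ?_, ?_⟩
    · rw [PySem.List.mem_pyRange_one, PySem.Str.len_eq]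
      constructor <;> [positivity; omega]
    · rw [PySem.Str.isIn_iff_infix, PySem.Str.toList_slice, PySem.Str.toList_slice,
        PySem.Chars.slice_eq_listSlice, PySem.Chars.slice_eq_listSlice]
      have e1 : (t : Int) + 2 = (t : Int) + ((2 : Nat) : Int) := by push_cast; ring
      have e2 : (t : Int) + ((2 : Nat) : Int) = ((t + 2 : Nat) : Int) := by push_cast; ring
      rw [e1, PySem.List.slice_natCast_add, e2, PySem.List.slice_from_natCast,
        pvTakeTwo s.toList t ht, pvInfixPair]
      refine ⟨u - (t + 2), ?_, ?_⟩
      · rw [List.getElem?_drop]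
        have e : t + 2 + (u - (t + 2)) = u := by omega
        rw [e, ← h1, List.getElem?_eq_getElem (show t < s.toList.length by omega)]
      · rw [List.getElem?_drop]
        have e : t + 2 + (u - (t + 2) + 1) = u + 1 := by omega
        rw [e, ← h2, List.getElem?_eq_getElem ht]

-- dict invariant for A's fold
lemma pvFoldGetD (cs : List Char) (m : Nat) (hm : m ≤ cs.length) (p : Char × Char) :
    (((PySem.List.enumerate cs 0).take m).foldl (pvStepA cs) PySem.Dict.empty).getD p []
      = PySem.Set.ofList (pvRaw cs m p) := by
  induction m with
  | zero => simp [pvRaw, PySem.Set.ofList, PySem.Set.empty]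
  | succ m ih =>
    have hm' : m < cs.length := by omega
    have htake : (PySem.List.enumerate cs 0).take (m + 1)
        = (PySem.List.enumerate cs 0).take m ++ [((m : Int), cs[m])] := by
      rw [List.take_add_one, PySem.List.getElem?_enumerate, List.getElem?_eq_getElem hm']
      simp
    rw [htake, List.foldl_append, List.foldl_cons, List.foldl_nil]
    have hraw : pvRaw cs (m + 1) p = pvRaw cs m p
        ++ (if 0 < m ∧ pvPair cs m = p then [(m : Int) - 1, (m : Int)] else []) := by
      simp [pvRaw, List.range_succ]
    have hof : ∀ (l t : List Int),
        PySem.Set.ofList (l ++ t) = t.foldl PySem.Set.add (PySem.Set.ofList l) := by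
      intro l t; simp [PySem.Set.ofList, List.foldl_append]
    by_cases hm0 : m = 0
    · subst hm0
      simp only [pvStepA, Nat.cast_zero, gt_iff_lt, lt_irrefl]
      rw [if_neg not_false, ih (by omega), hraw]
      simp
    · have hm1 : 0 < m := Nat.pos_of_ne_zero hm0
      have hpos : ((m : Int)) > 0 := by exact_mod_cast hm1
      simp only [pvStepA, if_pos hpos]
      have ep : ((m : Int) - 1) = ((m - 1 : Nat) : Int) := by omega
      rw [ep, PySem.List.pyGetD_natCast]
      have hpair : ((cs.getD (m - 1) ' ', cs[m]) : Char × Char) = pvPair cs m := by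
        unfold pvPair
        rw [List.getD_eq_getElem _ _ hm']
      rw [hpair]
      rw [PySem.Dict.getD_modify, PySem.Dict.getD_modify, PySem.Dict.getD_modify]
      rw [hraw, hof]
      by_cases hp : p = pvPair cs m
      · subst hp
        rw [if_pos rfl, if_pos rfl, ih (by omega), if_pos ⟨hm1, rfl⟩]
        rw [List.foldl_cons, List.foldl_cons, List.foldl_nil, ep]
      · rw [if_neg hp, if_neg hp, ih (by omega),
          if_neg (fun hc => hp hc.2.symm), List.foldl_nil]

lemma pvFoldNodup (cs : List Char) (l : List (Int × Char))
    (d : PySem.Dict (Char × Char) (PySem.Set Int)) (h : d.keys.Nodup) :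
    (l.foldl (pvStepA cs) d).keys.Nodup := by
  induction l generalizing d with
  | nil => exact h
  | cons x l ih =>
    rw [List.foldl_cons]
    apply ih
    unfold pvStepA
    split_ifs
    · rw [PySem.Dict.keys_modify]
      apply PySem.Dict.nodup_keys_insert
      rw [PySem.Dict.keys_modify]
      apply PySem.Dict.nodup_keys_insert
      exact h
    · exact h

-- occurrence of pair p starting at index t (the pair A records at enumerate step t+1)
def pvOcc (cs : List Char) (t : Nat) (p : Char × Char) : Prop :=
  t + 1 < cs.length ∧ pvPair cs (t + 1) = p

lemma pvGetDEq (cs : List Char) (v w : Nat) (hv : v < cs.length) (hw : w < cs.length) :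
    cs[v]? = cs[w]? ↔ cs.getD v ' ' = cs.getD w ' ' := by
  rw [List.getElem?_eq_getElem hv, List.getElem?_eq_getElem hw,
    List.getD_eq_getElem _ _ hv, List.getD_eq_getElem _ _ hw]
  simp

lemma pvMemRaw (cs : List Char) (m : Nat) (x : Int) (p : Char × Char) :
    x ∈ pvRaw cs m p
      ↔ ∃ i, i < m ∧ 0 < i ∧ pvPair cs i = p ∧ (x = (i : Int) - 1 ∨ x = (i : Int)) := by
  simp only [pvRaw, List.mem_flatMap, List.mem_range]
  constructor
  · rintro ⟨i, hi, hx⟩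
    by_cases hc : 0 < i ∧ pvPair cs i = p
    · rw [if_pos hc] at hx
      simp only [List.mem_cons, List.not_mem_nil, or_false] at hx
      exact ⟨i, hi, hc.1, hc.2, hx⟩
    · rw [if_neg hc] at hx
      simp at hx
  · rintro ⟨i, hi, h0, hp, hx⟩
    refine ⟨i, hi, ?_⟩
    rw [if_pos ⟨h0, hp⟩]
    simpa using hx

lemma pvMemRawOcc (cs : List Char) (x : Int) (p : Char × Char) :
    x ∈ pvRaw cs cs.length p
      ↔ ∃ t, pvOcc cs t p ∧ (x = (t : Int) ∨ x = (t : Int) + 1) := by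
  rw [pvMemRaw]
  constructor
  · rintro ⟨i, hi, h0, hp, hx⟩
    refine ⟨i - 1, ⟨by omega, by rwa [Nat.sub_add_cancel h0]⟩, by omega⟩
  · rintro ⟨t, ⟨ht, hp⟩, hx⟩
    exact ⟨t + 1, ht, by omega, hp, by omega⟩

-- if all occurrence starts of p lie in {a, a+1}, its position set has at most 3 elements
lemma pvWindow (cs : List Char) (p : Char × Char) (a : Nat)
    (ha : ∀ t, pvOcc cs t p → t = a ∨ t = a + 1) :
    (PySem.Set.ofList (pvRaw cs cs.length p)).length ≤ 3 := by
  have hnd := PySem.Set.nodup_ofList (pvRaw cs cs.length p)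
  rw [← List.toFinset_card_of_nodup hnd]
  have hsub : (PySem.Set.ofList (pvRaw cs cs.length p)).toFinset
      ⊆ ({(a : Int), (a : Int) + 1, (a : Int) + 2} : Finset Int) := by
    intro x hx
    rw [List.mem_toFinset, PySem.Set.mem_ofList, pvMemRawOcc] at hx
    obtain ⟨t, hocc, hor⟩ := hx
    rcases ha t hocc with rfl | rfl <;> simp only [Finset.mem_insert, Finset.mem_singleton] <;> omega
  refine le_trans (Finset.card_le_card hsub) ?_
  have h2 : ({(a : Int) + 1, (a : Int) + 2} : Finset Int).card ≤ 2 :=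
    le_trans (Finset.card_insert_le _ _) (by simp)
  have := Finset.card_insert_le ((a : Int)) ({(a : Int) + 1, (a : Int) + 2} : Finset Int)
  omega

lemma pvFourLe (l : List Int) (hnd : l.Nodup) (t u : Nat) (h : t + 2 ≤ u)
    (h1 : (t : Int) ∈ l) (h2 : (t : Int) + 1 ∈ l) (h3 : (u : Int) ∈ l)
    (h4 : (u : Int) + 1 ∈ l) : 3 < l.length := by
  have hsub : ({(t : Int), (t : Int) + 1, (u : Int), (u : Int) + 1} : Finset Int)
      ⊆ l.toFinset := by
    intro x hx
    simp only [Finset.mem_insert, Finset.mem_singleton] at hx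
    rw [List.mem_toFinset]
    rcases hx with rfl | rfl | rfl | rfl <;> assumption
  have hcard : ({(t : Int), (t : Int) + 1, (u : Int), (u : Int) + 1} : Finset Int).card = 4 := by
    rw [Finset.card_insert_of_notMem (by simp only [Finset.mem_insert, Finset.mem_singleton]; omega),
      Finset.card_insert_of_notMem (by simp only [Finset.mem_insert, Finset.mem_singleton]; omega),
      Finset.card_insert_of_notMem (by simp only [Finset.mem_singleton]; omega),
      Finset.card_singleton]
  have hle := Finset.card_le_card hsub
  rw [List.toFinset_card_of_nodup hnd] at hle
  omega

-- the combinatorial core: a position set exceeds 3 elements iff two starts are ≥ 2 apart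
lemma pvCore (cs : List Char) :
    (∃ p, (PySem.Set.ofList (pvRaw cs cs.length p)).length > 3) ↔ pvHasRep cs := by
  constructor
  · rintro ⟨p, hp⟩
    by_contra hrep
    have hne : pvRaw cs cs.length p ≠ [] := by
      intro h
      rw [h] at hp
      simp [PySem.Set.ofList, PySem.Set.empty] at hp
    obtain ⟨x, hx⟩ := List.exists_mem_of_ne_nil _ hne
    rw [pvMemRawOcc] at hx
    obtain ⟨a0, hocc0, -⟩ := hx
    have hclose : ∀ t u, pvOcc cs t p → pvOcc cs u p → ¬ (t + 2 ≤ u) := by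
      intro t u ht hu hle
      apply hrep
      have htl := ht.1
      have hul := hu.1
      refine ⟨t, u, hle, hu.1, ?_, ?_⟩
      · rw [pvGetDEq cs t u (by omega) (by omega)]
        have e1 : cs.getD t ' ' = (pvPair cs (t + 1)).1 := by simp [pvPair]
        have e2 : cs.getD u ' ' = (pvPair cs (u + 1)).1 := by simp [pvPair]
        rw [e1, e2, ht.2, hu.2]
      · rw [pvGetDEq cs (t + 1) (u + 1) (by omega) (by omega)]
        have e1 : cs.getD (t + 1) ' ' = (pvPair cs (t + 1)).2 := by simp [pvPair]
        have e2 : cs.getD (u + 1) ' ' = (pvPair cs (u + 1)).2 := by simp [pvPair]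
        rw [e1, e2, ht.2, hu.2]
    by_cases h0 : 0 < a0 ∧ pvOcc cs (a0 - 1) p
    · have hwin : ∀ t, pvOcc cs t p → t = a0 - 1 ∨ t = (a0 - 1) + 1 := by
        intro t ht
        have c1 := hclose t a0 ht hocc0
        have c2 := hclose a0 t hocc0 ht
        have c3 := hclose t (a0 - 1) ht h0.2
        have c4 := hclose (a0 - 1) t h0.2 ht
        omega
      have := pvWindow cs p (a0 - 1) hwin
      omega
    · have hwin : ∀ t, pvOcc cs t p → t = a0 ∨ t = a0 + 1 := by
        intro t ht
        have c1 := hclose t a0 ht hocc0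
        have c2 := hclose a0 t hocc0 ht
        by_cases he : t + 1 = a0
        · exact absurd ⟨by omega, by rw [show a0 - 1 = t by omega]; exact ht⟩ h0
        · omega
      have := pvWindow cs p a0 hwin
      omega
  · rintro ⟨t, u, htu, hu, h1, h2⟩
    refine ⟨pvPair cs (u + 1), ?_⟩
    have hpt : pvPair cs (t + 1) = pvPair cs (u + 1) := by
      have e1 := (pvGetDEq cs t u (by omega) (by omega)).mp h1
      have e2 := (pvGetDEq cs (t + 1) (u + 1) (by omega) (by omega)).mp h2
      simp only [pvPair, Nat.add_sub_cancel]
      rw [e1, e2]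
    have hocct : pvOcc cs t (pvPair cs (u + 1)) := ⟨by omega, hpt⟩
    have hoccu : pvOcc cs u (pvPair cs (u + 1)) := ⟨hu, rfl⟩
    apply pvFourLe _ (PySem.Set.nodup_ofList _) t u htu <;>
      rw [PySem.Set.mem_ofList, pvMemRawOcc]
    · exact ⟨t, hocct, Or.inl rfl⟩
    · exact ⟨t, hocct, Or.inr rfl⟩
    · exact ⟨u, hoccu, Or.inl rfl⟩
    · exact ⟨u, hoccu, Or.inr rfl⟩

-- A returns true iff pvHasRep
lemma pvAIff (s : String) : property1 s = true ↔ pvHasRep s.toList := by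
  unfold property1
  rw [show PySem.List.enumerate s.toList 0
      = (PySem.List.enumerate s.toList 0).take s.toList.length by
    rw [← PySem.List.length_enumerate s.toList 0, List.take_length]]
  set d := ((PySem.List.enumerate s.toList 0).take s.toList.length).foldl
    (pvStepA s.toList) PySem.Dict.empty with hd
  have hnodup : d.keys.Nodup := by
    rw [hd]
    exact pvFoldNodup s.toList _ _ (PySem.Dict.nodup_keys_empty)
  rw [List.any_eq_true]
  constructor
  · rintro ⟨kv, hkv, hgt⟩
    rw [PySem.Dict.items_eq_map_keys _ hnodup []] at hkv
    obtain ⟨k, hk, rfl⟩ := List.mem_map.mp hkv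
    simp only [decide_eq_true_eq] at hgt
    apply (pvCore s.toList).mp
    refine ⟨k, ?_⟩
    rw [← pvFoldGetD s.toList s.toList.length le_rfl k]
    exact hgt
  · intro hrep
    obtain ⟨p, hp⟩ := (pvCore s.toList).mpr hrep
    have hg : 3 < (d.getD p []).length := by
      rw [hd, pvFoldGetD s.toList s.toList.length le_rfl p]
      exact hp
    have hc : d.contains p = true := by
      by_contra h
      rw [Bool.not_eq_true] at h
      rw [PySem.Dict.getD_of_not_contains d [] h] at hg
      simp at hg
    refine ⟨(p, d.getD p []), ?_, by simpa using hg⟩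
    rw [PySem.Dict.items_eq_map_keys _ hnodup []]
    exact List.mem_map_of_mem ((PySem.Dict.contains_iff_mem_keys d p).mp hc)

-- ===== VERDICT (by name: the statement is the Claim_ definition above) =====
theorem property1_spec : Claim_equal_property1 := by
  intro s _
  unfold Spec_property1
  have h := (pvAIff s).trans (pvBIff s).symm
  cases hA : property1 s <;> cases hB : property1_alt s <;> simp_all
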